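-- pv_equiv track=rewrite | github.com/Jane11111/Leetcode2021 | Ali01.py | solve
-- ===== SOURCE A (Python) =====
-- def merge(lst):
--     tmp = []
--
--     i = 0
--     while i<len(lst):
--         tmp.append(lst[i])
--         j = i+1
--         while j<len(lst) and lst[j] == lst[j-1]:
--             j+=1
--         i = j
--     return tmp
--
-- def down(lst):
--
--     min_len = float('inf')
--     for num in lst:
--         if num!=0:
--             min_len = min(min_len,num)
--
--
--     for i in range(len(lst)):
--         if lst[i]!=0:
--             lst[i] -= min_len
--     return lst
--
-- def solve(n,lst):
--
--
--     lst = merge(lst)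
--
--     m = 0
--     left = []
--     if len(lst) == 1:
--         m = 1
--         left = [0]
--
--     while len(lst)!=1:
--         m+=1
--         lst = down(lst)
--         lst = merge(lst)
--         left.append(len(lst))
--     # m+=1
--     # left.append(1)
--     return m,left
-- ===== SOURCE B (Python) =====
-- def solve(n, lst):
--     # Analytic re-implementation: collapse equal-adjacent runs once; the t-th
--     # round's cumulative subtraction equals the t-th smallest distinct nonzero
--     # value v, an element is zero then iff it is 0 or <= v, and the surviving
--     # length is len(a) minus the number of adjacent pairs already fully zero.
--     # One sorted sweep over pair levels answers every round at once.
--     a = lst[:1] + [x for p, x in zip(lst, lst[1:]) if x != p]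
--     if len(a) == 1:
--         return 1, [0]
--     vals = sorted({x for x in a if x != 0})
--     # level at which the pair (p, q) merges: both members dead (0 or <= v)
--     levels = sorted((q if p == 0 else p if q == 0 else max(p, q))
--                     for p, q in zip(a, a[1:]))
--     left = []
--     j = 0
--     for v in vals:
--         while j < len(levels) and levels[j] <= v:
--             j += 1
--         left.append(len(a) - j)
--     return len(vals), left
-- ===== Notes on version B (the rewrite author's own statement) =====
-- stated objective: faster
-- what changed: A simulates the process round by round (subtract the minimal nonzero value, re-merge, re-scan, once per distinct value); B collapses runs once, observes that the t-th round's cumulative subtraction equals the t-th smallest distinct nonzero value and that an element is zero then iff it is 0 or <= that value, and answers every round's surviving length with one sorted sweep over adjacent-pair merge levels.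
-- outside the precondition, e.g. on solve(0, []): A does not finish within the time limit, B returns (0, [])
import Mathlib
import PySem

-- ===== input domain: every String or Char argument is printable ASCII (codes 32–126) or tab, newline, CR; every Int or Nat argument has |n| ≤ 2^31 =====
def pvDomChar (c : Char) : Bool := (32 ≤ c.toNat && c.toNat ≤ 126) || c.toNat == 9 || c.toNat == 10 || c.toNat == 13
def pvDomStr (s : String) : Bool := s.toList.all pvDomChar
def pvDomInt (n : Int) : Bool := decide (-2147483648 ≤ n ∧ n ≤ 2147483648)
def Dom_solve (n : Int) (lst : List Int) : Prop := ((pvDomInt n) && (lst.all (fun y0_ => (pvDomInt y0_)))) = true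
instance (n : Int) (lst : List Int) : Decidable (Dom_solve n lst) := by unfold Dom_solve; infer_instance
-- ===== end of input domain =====

-- B replaces A's round-by-round simulation (subtract the minimal nonzero value, re-merge,
-- re-scan; O(n · rounds)) by a closed-form analysis: the t-th round's cumulative subtraction
-- is the t-th smallest distinct nonzero value, so one sorted sweep over adjacent-pair "merge
-- levels" yields every round's length at once.  A mutates no caller-visible state (it
-- rebinds `lst` to merge's fresh list before mutating).

-- ===== PORT A =====
-- inner `while j<len(lst) and lst[j]==lst[j-1]` of merge; in-range indexing, so getD is exact
-- (fuel = lst.length is a pure totality guard: the loop's j is bounded by len(lst))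
def mergeSkip (lst : List Int) (fuel j : Nat) : Nat :=
  match fuel with
  | 0 => j
  | fuel+1 => if j < lst.length ∧ lst.getD j 0 = lst.getD (j-1) 0 then mergeSkip lst fuel (j+1) else j

-- outer `while i<len(lst)` of merge, with the accumulator tmp (fuel is again a totality guard)
def mergeLoopA (lst : List Int) (fuel : Nat) (i : Nat) (tmp : List Int) : List Int :=
  match fuel with
  | 0 => tmp
  | fuel+1 =>
    if i < lst.length then
      mergeLoopA lst fuel (mergeSkip lst lst.length (i+1)) (tmp ++ [lst.getD i 0])
    else tmp

def mergeA (lst : List Int) : List Int := mergeLoopA lst (lst.length + 1) 0 []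

-- `min_len` accumulator of down: none = float('inf'); min(inf, num) = num
def downMin (m : Option Int) (x : Int) : Option Int :=
  if x ≠ 0 then some (match m with | none => x | some v => min v x) else m

-- down: the indexed for-loop writes each cell independently, so it is the pointwise map;
-- `mn.getD 0` is only ever read when some element is nonzero, i.e. mn = some _
def downA (lst : List Int) : List Int :=
  let mn := lst.foldl downMin none
  lst.map (fun x => if x ≠ 0 then x - mn.getD 0 else x)

-- `while len(lst)!=1` of solve, with fuel (Python diverges only on [], excluded by Pre_;
-- on nonempty input the loop is proved below to exit within the provided fuel)
def solveLoopA (fuel : Nat) (lst : List Int) (m : Int) (left : List Int) : Int × List Int :=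
  match fuel with
  | 0 => (m, left)
  | fuel+1 =>
    if lst.length ≠ 1 then
      let lst2 := mergeA (downA lst)
      solveLoopA fuel lst2 (m+1) (left ++ [(lst2.length : Int)])
    else (m, left)

def solve (n : Int) (lst : List Int) : Int × List Int :=
  let l := mergeA lst
  let init : Int × List Int := if l.length = 1 then (1, [0]) else (0, [])
  solveLoopA (l.length + 1) l init.1 init.2

-- ===== PORT B =====
-- inner `while j < len(levels) and levels[j] <= v` of the sweep; in-range indexing
-- (fuel = levels.length is a pure totality guard: j is bounded by len(levels))
def sweepSkip (levels : List Int) (fuel : Nat) (v : Int) (j : Nat) : Nat :=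
  match fuel with
  | 0 => j
  | fuel+1 => if j < levels.length ∧ levels.getD j 0 ≤ v then sweepSkip levels fuel v (j+1) else j

def solve_alt (n : Int) (lst : List Int) : Int × List Int :=
  let a := lst.take 1 ++ (lst.zip lst.tail).filterMap (fun pq => if pq.2 ≠ pq.1 then some pq.2 else none)
  if a.length = 1 then (1, [0])
  else
    let vals := PySem.List.sorted (PySem.Set.ofList (a.filter (fun x => x ≠ 0))) (fun x => x) false
    let levels := PySem.List.sorted ((a.zip a.tail).map
      (fun pq => if pq.1 = 0 then pq.2 else if pq.2 = 0 then pq.1 else max pq.1 pq.2)) (fun x => x) false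
    let res := vals.foldl (fun (st : Nat × List Int) v =>
        let j := sweepSkip levels levels.length v st.1
        (j, st.2 ++ [((a.length : Int) - (j : Int))])) ((0 : Nat), ([] : List Int))
    ((vals.length : Int), res.2)

-- ===== PRECONDITION & SPEC =====
-- A's `while len(lst)!=1` never exits on the empty list (merge([]) = [] has length 0 and
-- down([])/merge([]) keep it []), so Python A loops forever there; everything else is admitted.
def Pre_solve (n : Int) (lst : List Int) : Prop := lst ≠ []
instance (n : Int) (lst : List Int) : Decidable (Pre_solve n lst) := by unfold Pre_solve; infer_instance
def pvWitness_solve : Int × List Int := (0, [2, 1, 1, 3])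
def Spec_solve (n : Int) (lst : List Int) (out : Int × List Int) : Prop := out = solve_alt n lst
instance (n : Int) (lst : List Int) (out : Int × List Int) : Decidable (Spec_solve n lst out) := by unfold Spec_solve; infer_instance

-- ===== CLAIM (what is proved, stated in full; the proofs are below) =====
def Claim_equal_solve : Prop := ∀ (n : Int) (lst : List Int), Dom_solve n lst → Pre_solve n lst → Spec_solve n lst (solve n lst)

-- ===== LEMMAS AND PROOFS =====

-- canonical run-collapse (keeps one element per maximal run of equal adjacent values)
def col : List Int → List Int
  | [] => []
  | [x] => [x]
  | x :: y :: t => if x = y then col (y :: t) else x :: col (y :: t)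

-- value an element has after the cumulative subtraction has reached level v
def flev (v x : Int) : Int := if x = 0 ∨ x ≤ v then 0 else x - v

-- level at which the adjacent pair (p, q) becomes a single zero
def keyf (p q : Int) : Int := if p = 0 then q else if q = 0 then p else max p q

def pairKeys : List Int → List Int
  | [] => []
  | [_] => []
  | p :: q :: t => keyf p q :: pairKeys (q :: t)

theorem col_mem (l : List Int) (x : Int) : x ∈ col l ↔ x ∈ l := by
  match l with
  | [] => simp [col]
  | [y] => simp [col]
  | y :: z :: t =>
    have ih := col_mem (z :: t) x
    by_cases h : y = z
    · simp only [col, if_pos h, ih]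
      subst h; simp
    · simp only [col, if_neg h, List.mem_cons, ih, List.mem_cons]
theorem col_eq_nil (l : List Int) : col l = [] ↔ l = [] := by
  match l with
  | [] => simp [col]
  | [y] => simp [col]
  | y :: z :: t =>
    have ih := col_eq_nil (z :: t)
    by_cases h : y = z <;> simp [col, h, ih]
theorem col_const (l : List Int) (c : Int) (h : ∀ x ∈ l, x = c) (hne : l ≠ []) : col l = [c] := by
  match l with
  | [x] =>
    have := h x (by simp); subst this; rfl
  | x :: y :: t =>
    have hx := h x (by simp)
    have hy := h y (by simp)
    have : x = y := by rw [hx, hy]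
    simp only [col, if_pos this]
    exact col_const (y :: t) c (fun z hz => h z (List.mem_cons_of_mem x hz)) (by simp)
theorem col_cons_dropWhile (x : Int) (s : List Int) :
    col (x :: s) = x :: col (s.dropWhile (fun y => decide (y = x))) := by
  induction s generalizing x with
  | nil => simp [col]
  | cons y t ih =>
    by_cases h : x = y
    · subst h
      simp only [col, if_pos rfl, List.dropWhile]
      simpa using ih x
    · simp only [col, if_neg h, List.dropWhile]
      have : (decide (y = x)) = false := by simp [Ne.symm h]
      rw [this]

theorem le_mergeSkip (lst : List Int) (fuel : Nat) : ∀ j, j ≤ mergeSkip lst fuel j := by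
  induction fuel with
  | zero => intro j; simp [mergeSkip]
  | succ fuel ih =>
    intro j
    rw [mergeSkip]
    split
    · have := ih (j+1); omega
    · exact le_refl j

theorem dropWhile_head_false (p : Int → Bool) (s : List Int) (z : Int) (t : List Int)
    (h : s.dropWhile p = z :: t) : p z = false := by
  induction s with
  | nil => simp [List.dropWhile] at h
  | cons a s' ih =>
    rw [List.dropWhile_cons] at h
    by_cases hp : p a
    · rw [if_pos hp] at h; exact ih h
    · rw [if_neg hp] at h; cases h; simpa using hp

theorem col_chain (l : List Int) : List.IsChain (fun x y => x ≠ y) (col l) := by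
  match l with
  | [] => simp [col]
  | x :: s =>
    rw [col_cons_dropWhile]
    have hrec := col_chain (s.dropWhile (fun y => decide (y = x)))
    refine hrec.cons ?_
    intro y hy
    rcases hd : s.dropWhile (fun y => decide (y = x)) with _ | ⟨z, t⟩
    · rw [hd] at hy; simp [col] at hy
    · have hz : z ≠ x := by
        have h2 := dropWhile_head_false (fun y => decide (y = x)) s z t hd
        simpa using h2
      rw [hd, col_cons_dropWhile] at hy
      simp only [List.head?_cons, Option.mem_some_iff] at hy
      subst hy; exact (Ne.symm hz)
termination_by l.length
decreasing_by simp; have := List.length_dropWhile_le (fun y => decide (y = x)) s; omega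
theorem col_map_col_cons (g : Int → Int) (m : List Int) (c : Int) :
    col (c :: (col m).map g) = col (c :: m.map g) := by
  match m with
  | [] => rfl
  | [y] => rfl
  | y :: z :: t =>
    by_cases h : y = z
    · subst h
      simp only [col, List.map, reduceIte]
      rw [col_map_col_cons g (y :: t) c]
      by_cases hc : c = g y <;> simp [col, List.map, hc]
    · simp only [col, if_neg h, List.map]
      have ih := col_map_col_cons g (z :: t) (g y)
      show col (c :: g y :: (col (z :: t)).map g) = col (c :: g y :: g z :: t.map g)
      have ih' : col (g y :: (col (z :: t)).map g) = col (g y :: g z :: t.map g) := by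
        simpa using ih
      by_cases hc : c = g y
      · show col (c :: g y :: (col (z :: t)).map g) = col (c :: g y :: g z :: t.map g)
        rw [(by simp [col, hc] : col (c :: g y :: (col (z :: t)).map g) = col (g y :: (col (z :: t)).map g)),
            (by simp [col, hc] : col (c :: g y :: g z :: t.map g) = col (g y :: g z :: t.map g))]
        exact ih'
      · rw [(by simp [col, hc] : col (c :: g y :: (col (z :: t)).map g) = c :: col (g y :: (col (z :: t)).map g)),
            (by simp [col, hc] : col (c :: g y :: g z :: t.map g) = c :: col (g y :: g z :: t.map g))]
        rw [ih']
theorem col_map_col (g : Int → Int) (l : List Int) :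
    col ((col l).map g) = col (l.map g) := by
  match l with
  | [] => rfl
  | [x] => rfl
  | x :: y :: t =>
    by_cases h : x = y
    · subst h
      simp only [col, List.map, reduceIte]
      rw [col_map_col g (x :: t)]
      simp [List.map]
    · simp only [col, if_neg h, List.map]
      exact col_map_col_cons g (y :: t) (g x)

theorem skip_drop (lst : List Int) (fuel : Nat) : ∀ (j : Nat), 1 ≤ j → lst.length ≤ fuel + j →
    lst.drop (mergeSkip lst fuel j) = (lst.drop j).dropWhile (fun y => decide (y = lst.getD (j-1) 0)) := by
  induction fuel with
  | zero =>
    intro j hj hflen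
    rw [mergeSkip, List.drop_eq_nil_of_le (by omega)]
    simp
  | succ fuel ih =>
    intro j hj hflen
    rw [mergeSkip]
    split
    · rename_i h
      obtain ⟨hlt, heq⟩ := h
      rw [ih (j+1) (by omega) (by omega)]
      have hd : lst.drop j = lst[j] :: lst.drop (j+1) := List.drop_eq_getElem_cons hlt
      rw [hd, List.dropWhile_cons]
      have hj0 : lst.getD j 0 = lst[j] := List.getD_eq_getElem lst 0 hlt
      have hdec : (decide (lst[j] = lst.getD (j-1) 0)) = true := by
        rw [← hj0]; exact decide_eq_true heq
      rw [if_pos hdec]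
      have hpred : (fun y => decide (y = lst.getD (j+1-1) 0)) = (fun y => decide (y = lst.getD (j-1) 0)) := by
        funext y
        have hg : lst.getD (j+1-1) 0 = lst.getD (j-1) 0 := by
          rw [Nat.add_sub_cancel]; exact heq
        rw [hg]
      rw [hpred]
    · rename_i h
      by_cases hlt : j < lst.length
      · have heq : ¬ (lst.getD j 0 = lst.getD (j-1) 0) := by tauto
        have hd : lst.drop j = lst[j] :: lst.drop (j+1) := List.drop_eq_getElem_cons hlt
        have hj0 : lst.getD j 0 = lst[j] := List.getD_eq_getElem lst 0 hlt
        have hdec : (decide (lst[j] = lst.getD (j-1) 0)) = false := by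
          rw [← hj0]; exact decide_eq_false heq
        rw [hd, List.dropWhile_cons, if_neg (by rw [hdec]; simp)]
      · rw [List.drop_eq_nil_of_le (by omega)]
        simp
theorem mergeLoopA_col (lst : List Int) (fuel : Nat) : ∀ (i : Nat) (tmp : List Int),
    lst.length ≤ fuel + i → mergeLoopA lst fuel i tmp = tmp ++ col (lst.drop i) := by
  induction fuel with
  | zero =>
    intro i tmp hflen
    rw [mergeLoopA, List.drop_eq_nil_of_le (by omega)]
    simp [col]
  | succ fuel ih =>
    intro i tmp hflen
    rw [mergeLoopA]
    split
    · rename_i hlt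
      have hsle := le_mergeSkip lst lst.length (i+1)
      have hrec := ih (mergeSkip lst lst.length (i+1)) (tmp ++ [lst.getD i 0]) (by omega)
      have hj0 : lst.getD i 0 = lst[i] := List.getD_eq_getElem lst 0 hlt
      have hsk := skip_drop lst lst.length (i+1) (by omega) (by omega)
      rw [Nat.add_sub_cancel, hj0] at hsk
      rw [hrec, hsk, hj0]
      have hd : lst.drop i = lst[i] :: lst.drop (i+1) := List.drop_eq_getElem_cons hlt
      rw [hd, col_cons_dropWhile, List.append_assoc]
      rfl
    · rename_i hlt
      rw [List.drop_eq_nil_of_le (by omega)]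
      simp [col]

theorem mergeA_col (lst : List Int) : mergeA lst = col lst := by
  rw [mergeA, mergeLoopA_col lst (lst.length + 1) 0 [] (by omega)]
  simp

theorem alt_collapse (lst : List Int) :
    lst.take 1 ++ (lst.zip lst.tail).filterMap (fun pq => if pq.2 ≠ pq.1 then some pq.2 else none) = col lst := by
  match lst with
  | [] => rfl
  | [x] => rfl
  | x :: y :: t =>
    have ih := alt_collapse (y :: t)
    by_cases h : x = y
    · subst h
      simp only [List.take, List.tail, List.zip_cons_cons, List.filterMap_cons, col, reduceIte,
        List.append_nil, List.nil_append, List.cons_append, List.singleton_append, ne_eq,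
        not_true_eq_false] at ih ⊢
      exact ih
    · have hY : (if y ≠ x then some y else none) = some y := by simp [Ne.symm h]
      simp only [List.take, List.tail, List.zip_cons_cons, List.filterMap_cons, hY, col, if_neg h,
        List.cons_append, List.nil_append, List.singleton_append] at ih ⊢
      rw [ih]
theorem pairKeys_eq_zip (a : List Int) :
    (a.zip a.tail).map (fun pq => if pq.1 = 0 then pq.2 else if pq.2 = 0 then pq.1 else max pq.1 pq.2)
      = pairKeys a := by
  match a with
  | [] => rfl
  | [x] => rfl
  | x :: y :: t =>
    have ih := pairKeys_eq_zip (y :: t)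
    simp only [List.tail, List.zip_cons_cons, List.map_cons, pairKeys, List.cons_eq_cons]
    exact ⟨rfl, ih⟩
theorem key_equiv (v x y : Int) (hxy : x ≠ y) : flev v x = flev v y ↔ keyf x y ≤ v := by
  simp only [flev, keyf]
  split_ifs <;> omega

theorem col_length_map (a : List Int) (ha : List.IsChain (fun x y => x ≠ y) a) (v : Int) :
    (col (a.map (flev v))).length + (pairKeys a).countP (fun k => decide (k ≤ v)) = a.length := by
  match a with
  | [] => rfl
  | [x] => rfl
  | x :: y :: t =>
    rw [List.isChain_cons_cons] at ha
    have ih := col_length_map (y :: t) ha.2 v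
    by_cases h : flev v x = flev v y
    · have hk : (decide (keyf x y ≤ v)) = true := decide_eq_true ((key_equiv v x y ha.1).mp h)
      simp only [List.map_cons, pairKeys, List.countP_cons, col, if_pos h, hk, List.length_cons] at ih ⊢
      simp only [if_true]
      omega
    · have hk : (decide (keyf x y ≤ v)) = false := by
        apply decide_eq_false
        intro hc; exact h ((key_equiv v x y ha.1).mpr hc)
      simp only [List.map_cons, pairKeys, List.countP_cons, col, if_neg h, hk, List.length_cons] at ih ⊢
      simp only [Bool.false_eq_true, if_false]
      omega

theorem foldl_downMin_acc (l : List Int) : ∀ (a c : Int),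
    (∀ x ∈ l, x ≠ 0 → c ≤ x) → c ≤ a → (c = a ∨ (c ∈ l ∧ c ≠ 0)) →
    l.foldl downMin (some a) = some c := by
  induction l with
  | nil =>
    intro a c _ hca hmem
    rcases hmem with h | h
    · simp [h]
    · simp at h
  | cons x t ih =>
    intro a c hmin hca hmem
    rw [List.foldl_cons]
    by_cases hx : x = 0
    · rw [show downMin (some a) x = some a by simp [downMin, hx]]
      refine ih a c (fun y hy hy0 => hmin y (List.mem_cons_of_mem x hy) hy0) hca ?_
      rcases hmem with h | ⟨h, h0⟩
      · exact Or.inl h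
      · rcases List.mem_cons.mp h with rfl | h'
        · exact absurd hx h0
        · exact Or.inr ⟨h', h0⟩
    · rw [show downMin (some a) x = some (min a x) by simp [downMin, hx]]
      have hcx : c ≤ x := hmin x (by simp) hx
      refine ih (min a x) c (fun y hy hy0 => hmin y (List.mem_cons_of_mem x hy) hy0)
        (le_min hca hcx) ?_
      rcases hmem with rfl | ⟨h, h0⟩
      · left; omega
      · rcases List.mem_cons.mp h with rfl | h'
        · left; omega
        · exact Or.inr ⟨h', h0⟩

theorem foldl_downMin_some (l : List Int) (w : Int)
    (hw : w ∈ l) (hw0 : w ≠ 0) (hmin : ∀ x ∈ l, x ≠ 0 → w ≤ x) :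
    l.foldl downMin none = some w := by
  induction l with
  | nil => simp at hw
  | cons x t ih =>
    rw [List.foldl_cons]
    by_cases hx : x = 0
    · rw [show downMin none x = none by simp [downMin, hx]]
      have hwt : w ∈ t := by
        rcases List.mem_cons.mp hw with rfl | h
        · exact absurd hx hw0
        · exact h
      exact ih hwt (fun y hy hy0 => hmin y (List.mem_cons_of_mem x hy) hy0)
    · rw [show downMin none x = some x by simp [downMin, hx]]
      refine foldl_downMin_acc t x w (fun y hy hy0 => hmin y (List.mem_cons_of_mem x hy) hy0)
        (hmin x (by simp) hx) ?_
      rcases List.mem_cons.mp hw with rfl | h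
      · exact Or.inl rfl
      · exact Or.inr ⟨h, hw0⟩

theorem down_eq_map (l : List Int) (w : Int)
    (hw : w ∈ l) (hw0 : w ≠ 0) (hmin : ∀ x ∈ l, x ≠ 0 → w ≤ x) :
    downA l = l.map (fun x => if x ≠ 0 then x - w else x) := by
  rw [downA]
  rw [foldl_downMin_some l w hw hw0 hmin]
  rfl

theorem filter_lt_step (l : List Int) (hl : l.Pairwise (· < ·)) (v w : Int) (r : List Int)
    (h : l.filter (fun x => decide (v < x)) = w :: r) :
    l.filter (fun x => decide (w < x)) = r := by
  induction l with
  | nil => simp at h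
  | cons x t ih =>
    rw [List.pairwise_cons] at hl
    rw [List.filter_cons] at h ⊢
    by_cases hvx : v < x
    · rw [if_pos (by simpa using hvx)] at h
      rcases List.cons_eq_cons.mp h with ⟨rfl, rfl⟩
      rw [if_neg (by simp)]
      apply List.filter_congr
      intro y hy
      have hxy := hl.1 y hy
      simp only [decide_eq_decide]
      omega
    · rw [if_neg (by simpa using hvx)] at h
      have hxw : ¬ w < x := by
        have hwmem : w ∈ t.filter (fun x => decide (v < x)) := by rw [h]; simp
        have hwt : w ∈ t := (List.mem_filter.mp hwmem).1
        have := hl.1 w hwt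
        omega
      rw [if_neg (by simpa using hxw)]
      exact ih hl.2 h

-- distinct nonzero values of a, sorted ascending (exactly B's vals expression)
def valsOf (a : List Int) : List Int :=
  PySem.List.sorted (PySem.Set.ofList (a.filter (fun x => x ≠ 0))) (fun x => x) false

theorem mem_valsOf (a : List Int) (x : Int) : x ∈ valsOf a ↔ x ∈ a ∧ x ≠ 0 := by
  rw [valsOf, PySem.List.mem_sorted, PySem.Set.mem_ofList, List.mem_filter]
  simp

theorem valsOf_pairwise_lt (a : List Int) : (valsOf a).Pairwise (· < ·) := by
  rw [valsOf]
  exact PySem.List.sorted_ofList_pairwise_lt _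

theorem setOfList_length_aux (xs : List Int) : ∀ acc : PySem.Set Int,
    (xs.foldl PySem.Set.add acc).length ≤ acc.length + xs.length := by
  induction xs with
  | nil => intro acc; simp
  | cons x t ih =>
    intro acc
    rw [List.foldl_cons]
    have h1 : (PySem.Set.add acc x).length ≤ acc.length + 1 := by
      rw [PySem.Set.add]
      split <;> simp
    have := ih (PySem.Set.add acc x)
    simp only [List.length_cons]
    omega

theorem valsOf_length_le (a : List Int) : (valsOf a).length ≤ a.length := by
  rw [valsOf, PySem.List.length_sorted, PySem.Set.ofList_eq_foldl]
  have h1 := setOfList_length_aux (a.filter (fun x => x ≠ 0)) []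
  have h2 := List.length_filter_le (fun x => decide ¬x = 0) a
  simp only [List.length_nil, Nat.zero_add] at h1
  calc (List.foldl PySem.Set.add [] (a.filter (fun x => x ≠ 0))).length
      ≤ (a.filter (fun x => x ≠ 0)).length := h1
    _ ≤ a.length := by simpa using h2

theorem countP_index (pm : List Int) (hs : pm.Pairwise (· ≤ ·)) (v : Int) :
    ∀ i, (h : i < pm.length) → (pm[i] ≤ v ↔ i < pm.countP (fun k => decide (k ≤ v))) := by
  induction pm with
  | nil => intro i h; simp at h
  | cons x t ih =>
    rw [List.pairwise_cons] at hs
    intro i h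
    rw [List.countP_cons]
    match i with
    | 0 =>
      simp only [List.getElem_cons_zero]
      by_cases hx : x ≤ v
      · simp [hx]
      · have ht : t.countP (fun k => decide (k ≤ v)) = 0 := by
          rw [List.countP_eq_zero]
          intro y hy
          have := hs.1 y hy
          simp only [decide_eq_true_eq]
          omega
        simp [hx, ht]
    | i + 1 =>
      simp only [List.getElem_cons_succ]
      have hih := ih hs.2 i (by simpa using Nat.lt_of_succ_lt_succ h)
      by_cases hx : x ≤ v
      · simp only [hx, decide_true, if_pos]
        omega
      · have ht : t.countP (fun k => decide (k ≤ v)) = 0 := by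
          rw [List.countP_eq_zero]
          intro y hy
          have := hs.1 y hy
          simp only [decide_eq_true_eq]
          omega
        have hit : i < t.length := by
          simpa using Nat.lt_of_succ_lt_succ h
        have hti : ¬ t[i] ≤ v := by
          have := hs.1 (t[i]'hit) (List.getElem_mem hit)
          omega
        simp [hx, ht, hti]

theorem sweepSkip_eq (pm : List Int) (hs : pm.Pairwise (· ≤ ·)) (v : Int) (fuel : Nat) :
    ∀ (j : Nat), j ≤ pm.countP (fun k => decide (k ≤ v)) → pm.length ≤ fuel + j →
    sweepSkip pm fuel v j = pm.countP (fun k => decide (k ≤ v)) := by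
  induction fuel with
  | zero =>
    intro j hj hflen
    have := List.countP_le_length (p := fun k => decide (k ≤ v)) (l := pm)
    rw [sweepSkip]
    omega
  | succ fuel ih =>
    intro j hj hflen
    rw [sweepSkip]
    split
    · rename_i hcond
      obtain ⟨hlt, hle⟩ := hcond
      have hget : pm.getD j 0 = pm[j] := List.getD_eq_getElem pm 0 hlt
      have : j < pm.countP (fun k => decide (k ≤ v)) :=
        (countP_index pm hs v j hlt).mp (by rw [← hget]; exact hle)
      exact ih (j+1) (by omega) (by omega)
    · rename_i hcond
      by_cases hlt : j < pm.length
      · have hle : ¬ pm.getD j 0 ≤ v := by tauto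
        have hget : pm.getD j 0 = pm[j] := List.getD_eq_getElem pm 0 hlt
        have hnc : ¬ j < pm.countP (fun k => decide (k ≤ v)) := by
          intro hc
          exact hle (by rw [hget]; exact (countP_index pm hs v j hlt).mpr hc)
        omega
      · have := List.countP_le_length (p := fun k => decide (k ≤ v)) (l := pm)
        omega

theorem sweep_fold (pm : List Int) (hs : pm.Pairwise (· ≤ ·)) (alen : Int) :
    ∀ (vs : List Int) (j : Nat) (acc : List Int),
      vs.Pairwise (· ≤ ·) → (∀ x ∈ vs, j ≤ pm.countP (fun k => decide (k ≤ x))) →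
      (vs.foldl (fun (st : Nat × List Int) v =>
          let jj := sweepSkip pm pm.length v st.1
          (jj, st.2 ++ [alen - (jj : Int)])) (j, acc)).2
        = acc ++ vs.map (fun v => alen - ((pm.countP (fun k => decide (k ≤ v)) : Int))) := by
  intro vs
  induction vs with
  | nil => intro j acc _ _; simp
  | cons v vs' ih =>
    intro j acc hp hj
    rw [List.pairwise_cons] at hp
    rw [List.foldl_cons]
    simp only
    rw [sweepSkip_eq pm hs v pm.length j (hj v (by simp)) (by omega)]
    rw [ih _ _ hp.2 ?_]
    · simp
    · intro x hx
      exact List.countP_mono_left (fun k _ hk => by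
        simp only [decide_eq_true_eq] at hk ⊢
        have := hp.1 x hx
        omega)

-- the A-loop, started at cumulative level v, performs one round per remaining distinct value
theorem loopA_spec (a : List Int) (ha : List.IsChain (fun x y => x ≠ y) a) (hne : a ≠ [])
    (hlen : a.length ≠ 1) :
    ∀ (rest : List Int) (v : Int) (fuel : Nat) (m : Int) (left : List Int),
      v ∈ valsOf a →
      rest = (valsOf a).filter (fun x => decide (v < x)) →
      rest.length ≤ fuel →
      solveLoopA fuel (col (a.map (flev v))) m left
        = (m + rest.length,
           left ++ rest.map (fun w =>
             (a.length : Int) - ((pairKeys a).countP (fun k => decide (k ≤ w)) : Int))) := by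
  intro rest
  induction rest with
  | nil =>
    intro v fuel m left hv hrest hfuel
    have hall : ∀ z ∈ a.map (flev v), z = 0 := by
      intro z hz
      rcases List.mem_map.mp hz with ⟨x, hx, rfl⟩
      by_cases hx0 : x = 0
      · simp [flev, hx0]
      · have hxv : x ∈ valsOf a := (mem_valsOf a x).mpr ⟨hx, hx0⟩
        have : ¬ v < x := by
          intro hlt
          have : x ∈ (valsOf a).filter (fun y => decide (v < y)) :=
            List.mem_filter.mpr ⟨hxv, by simpa using hlt⟩
          rw [← hrest] at this
          simp at this
        simp [flev]
        omega
    have hcol : col (a.map (flev v)) = [0] :=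
      col_const _ 0 hall (by simpa using hne)
    rw [hcol]
    match fuel with
    | 0 => simp [solveLoopA]
    | fuel + 1 => simp [solveLoopA]
  | cons w rest' ih =>
    intro v fuel m left hv hrest hfuel
    have hwf : w ∈ (valsOf a).filter (fun x => decide (v < x)) := by rw [← hrest]; simp
    have hwvals : w ∈ valsOf a := (List.mem_filter.mp hwf).1
    have hvw : v < w := by simpa using (List.mem_filter.mp hwf).2
    have hwa : w ∈ a := ((mem_valsOf a w).mp hwvals).1
    have hw0 : w ≠ 0 := ((mem_valsOf a w).mp hwvals).2
    have hmin : ∀ x ∈ valsOf a, v < x → w ≤ x := by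
      intro x hx hvx
      have hxf : x ∈ (valsOf a).filter (fun y => decide (v < y)) :=
        List.mem_filter.mpr ⟨hx, by simpa using hvx⟩
      rw [← hrest] at hxf
      rcases List.mem_cons.mp hxf with rfl | hxr
      · exact le_rfl
      · have hpw : ((valsOf a).filter (fun y => decide (v < y))).Pairwise (· < ·) :=
          (valsOf_pairwise_lt a).filter _
        rw [← hrest] at hpw
        rw [List.pairwise_cons] at hpw
        exact le_of_lt (hpw.1 x hxr)
    -- the current list has length ≥ 2, so the loop body runs
    have hflw : flev v w = w - v := by
      simp only [flev]
      rw [if_neg (by omega)]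
    have hlen2 : (col (a.map (flev v))).length ≠ 1 := by
      intro h1
      rcases List.length_eq_one_iff.mp h1 with ⟨z, hz⟩
      have hzmem : ∀ u ∈ a.map (flev v), u = z := by
        intro u hu
        have : u ∈ col (a.map (flev v)) := (col_mem _ u).mpr hu
        rw [hz] at this
        simpa using this
      have hwz : z = w - v := by
        have := hzmem (flev v w) (List.mem_map_of_mem hwa)
        rw [hflw] at this
        omega
      match a, ha, hne, hlen with
      | p :: q :: t, ha, _, _ =>
        have hpq : p ≠ q := (List.isChain_cons_cons.mp ha).1
        have hp := hzmem (flev v p) (by simp)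
        have hq := hzmem (flev v q) (by simp [List.mem_map_of_mem])
        rw [hwz] at hp hq
        have hwv0 : w - v ≠ 0 := by omega
        have hplive : p = w := by
          by_cases hd : p = 0 ∨ p ≤ v
          · simp [flev, hd] at hp; omega
          · simp only [flev, if_neg hd] at hp; omega
        have hqlive : q = w := by
          by_cases hd : q = 0 ∨ q ≤ v
          · simp [flev, hd] at hq; omega
          · simp only [flev, if_neg hd] at hq; omega
        exact hpq (hplive.trans hqlive.symm)
    match fuel, hfuel with
    | fuel + 1, hfuel =>
      rw [solveLoopA, if_pos hlen2]
      have hdown : downA (col (a.map (flev v)))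
          = (col (a.map (flev v))).map (fun y => if y ≠ 0 then y - (w - v) else y) := by
        apply down_eq_map
        · exact (col_mem _ _).mpr (by rw [← hflw]; exact List.mem_map_of_mem hwa)
        · omega
        · intro y hy hy0
          rcases List.mem_map.mp ((col_mem _ y).mp hy) with ⟨x, hx, rfl⟩
          have hxlive : ¬ (x = 0 ∨ x ≤ v) := by
            intro hd
            simp [flev, hd] at hy0
          simp only [flev, if_neg hxlive] at hy0 ⊢
          have hwx : w ≤ x := hmin x ((mem_valsOf a x).mpr ⟨hx, by omega⟩) (by omega)
          omega
      have hstep : mergeA (downA (col (a.map (flev v)))) = col (a.map (flev w)) := by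
        rw [hdown, mergeA_col, col_map_col, List.map_map]
        congr 1
        apply List.map_congr_left
        intro x hx
        simp only [Function.comp_apply]
        by_cases hd : x = 0 ∨ x ≤ v
        · have hdw : x = 0 ∨ x ≤ w := by
            rcases hd with h | h
            · exact Or.inl h
            · exact Or.inr (by omega)
          simp only [flev, if_pos hd, if_pos hdw]
          simp
        · have hd1 : ¬ x = 0 := fun h => hd (Or.inl h)
          have hd2 : v < x := by by_contra hc; exact hd (Or.inr (by omega))
          simp only [flev, if_neg hd]
          by_cases hdw : x = 0 ∨ x ≤ w
          · have hwx : w ≤ x := hmin x ((mem_valsOf a x).mpr ⟨hx, hd1⟩) hd2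
            rw [if_pos hdw, if_pos (show x - v ≠ 0 by omega)]
            have hxw : x = w := by
              rcases hdw with h | h
              · exact absurd h hd1
              · omega
            omega
          · rw [if_neg hdw, if_pos (show x - v ≠ 0 by omega)]
            omega
      rw [hstep]
      have hrest' : rest' = (valsOf a).filter (fun x => decide (w < x)) :=
        (filter_lt_step (valsOf a) (valsOf_pairwise_lt a) v w rest' hrest.symm).symm
      have hlenw : ((col (a.map (flev w))).length : Int)
          = (a.length : Int) - ((pairKeys a).countP (fun k => decide (k ≤ w)) : Int) := by
        have := col_length_map a ha w
        omega
      rw [ih w fuel (m+1) (left ++ [((col (a.map (flev w))).length : Int)]) hwvals hrest'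
        (by simpa using Nat.le_of_succ_le_succ hfuel)]
      rw [hlenw]
      simp only [List.length_cons, List.map_cons, List.append_assoc, List.singleton_append]
      simp only [Prod.mk.injEq]
      refine ⟨by push_cast; ring, by simp [List.append_assoc]⟩
  
theorem A_main (a : List Int) (ha : List.IsChain (fun x y => x ≠ y) a) (hne : a ≠ [])
    (hlen : a.length ≠ 1) :
    solveLoopA (a.length + 1) a 0 []
      = (((valsOf a).length : Int), (valsOf a).map (fun w =>
          (a.length : Int) - ((pairKeys a).countP (fun k => decide (k ≤ w)) : Int))) := by
  have h2 : 2 ≤ a.length := by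
    have h0 : a.length ≠ 0 := fun h => hne (List.length_eq_zero_iff.mp h)
    omega
  have hex : ∃ x ∈ a, x ≠ 0 := by
    match a, ha, h2 with
    | p :: q :: t, ha, _ =>
      have hpq := (List.isChain_cons_cons.mp ha).1
      by_cases hp : p = 0
      · exact ⟨q, by simp, fun h => hpq (by rw [hp, h])⟩
      · exact ⟨p, by simp, hp⟩
  obtain ⟨x₀, hx₀a, hx₀⟩ := hex
  have hvne : valsOf a ≠ [] := by
    intro h
    have hmem := (mem_valsOf a x₀).mpr ⟨hx₀a, hx₀⟩
    rw [h] at hmem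
    simp at hmem
  obtain ⟨c, tl, hv⟩ : ∃ c tl, valsOf a = c :: tl := by
    match hvv : valsOf a, hvne with
    | c :: tl, _ => exact ⟨c, tl, rfl⟩
  have hcmem : c ∈ valsOf a := by rw [hv]; simp
  have hca : c ∈ a := ((mem_valsOf a c).mp hcmem).1
  have hc0 : c ≠ 0 := ((mem_valsOf a c).mp hcmem).2
  have hcmin : ∀ y ∈ a, y ≠ 0 → c ≤ y := by
    intro y hy hy0
    have hv' : PySem.List.sorted (PySem.Set.ofList (a.filter (fun x => x ≠ 0))) (fun x => x) false
        = c :: tl := hv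
    have h' := PySem.List.key_head_sorted_le (PySem.Set.ofList (a.filter (fun x => x ≠ 0)))
      (fun x => x) hv'
    exact h' y ((PySem.Set.mem_ofList _ y).mpr (List.mem_filter.mpr ⟨hy, by simpa using hy0⟩))
  have hdown : downA a = a.map (flev c) := by
    rw [down_eq_map a c hca hc0 hcmin]
    apply List.map_congr_left
    intro x hx
    by_cases hx0 : x = 0
    · simp [flev, hx0]
    · rw [if_pos (by simpa using hx0)]
      simp only [flev]
      by_cases hxc : x ≤ c
      · have := hcmin x hx hx0
        rw [if_pos (Or.inr hxc)]
        omega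
      · rw [if_neg (show ¬(x = 0 ∨ x ≤ c) by omega)]
  have htl : tl = (valsOf a).filter (fun x => decide (c < x)) := by
    have hpw := valsOf_pairwise_lt a
    rw [hv] at hpw
    rw [List.pairwise_cons] at hpw
    rw [hv, List.filter_cons, if_neg (by simp)]
    exact (List.filter_eq_self.mpr (fun y hy => by simpa using hpw.1 y hy)).symm
  have hfuel : tl.length ≤ a.length := by
    have h1 := valsOf_length_le a
    rw [hv] at h1
    simp only [List.length_cons] at h1
    omega
  rw [solveLoopA, if_pos hlen]
  simp only [hdown, mergeA_col]
  rw [loopA_spec a ha hne hlen tl c a.length (0+1)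
    ([] ++ [((col (a.map (flev c))).length : Int)]) hcmem htl hfuel]
  have hlc : ((col (a.map (flev c))).length : Int)
      = (a.length : Int) - ((pairKeys a).countP (fun k => decide (k ≤ c)) : Int) := by
    have := col_length_map a ha c
    omega
  rw [hv]
  simp only [Prod.mk.injEq, List.length_cons, List.map_cons, List.nil_append,
    List.singleton_append, List.cons_append, List.nil_append]
  constructor
  · push_cast
    ring
  · rw [hlc]

theorem B_main (a : List Int) :
    ((PySem.List.sorted (PySem.Set.ofList (a.filter (fun x => x ≠ 0))) (fun x => x) false).foldl
        (fun (st : Nat × List Int) v =>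
          let j := sweepSkip (PySem.List.sorted ((a.zip a.tail).map
              (fun pq => if pq.1 = 0 then pq.2 else if pq.2 = 0 then pq.1 else max pq.1 pq.2))
              (fun x => x) false)
            (PySem.List.sorted ((a.zip a.tail).map
              (fun pq => if pq.1 = 0 then pq.2 else if pq.2 = 0 then pq.1 else max pq.1 pq.2))
              (fun x => x) false).length v st.1
          (j, st.2 ++ [((a.length : Int) - (j : Int))])) ((0 : Nat), ([] : List Int))).2
      = (valsOf a).map (fun w =>
          (a.length : Int) - ((pairKeys a).countP (fun k => decide (k ≤ w)) : Int)) := by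
  rw [pairKeys_eq_zip]
  rw [show PySem.List.sorted (PySem.Set.ofList (a.filter (fun x => x ≠ 0))) (fun x => x) false
      = valsOf a from rfl]
  have hs : (PySem.List.sorted (pairKeys a) (fun x => x) false).Pairwise (· ≤ ·) := by
    have := PySem.List.sorted_pairwise (pairKeys a) (fun x => x)
    simpa using this
  rw [sweep_fold (PySem.List.sorted (pairKeys a) (fun x => x) false) hs ((a.length : Int))
    (valsOf a) 0 [] ((valsOf_pairwise_lt a).imp (fun h => le_of_lt h)) (fun x _ => Nat.zero_le _)]
  rw [List.nil_append]
  apply List.map_congr_left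
  intro w _
  rw [(PySem.List.sorted_perm (pairKeys a) (fun x => x) false).countP_eq]

-- ===== VERDICT (by name: the statement is the Claim_ definition above) =====
theorem solve_spec : Claim_equal_solve := by
  intro n lst _ hpre
  unfold Spec_solve Pre_solve at *
  rw [solve, solve_alt]
  simp only [mergeA_col, alt_collapse]
  by_cases hL : (col lst).length = 1
  · rw [if_pos hL, if_pos hL]
    rw [solveLoopA, if_neg (by simp [hL])]
  · rw [if_neg hL, if_neg hL]
    have hne : col lst ≠ [] := fun h => hpre ((col_eq_nil lst).mp h)
    have hA := A_main (col lst) (col_chain lst) hne hL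
    simp only at hA ⊢
    rw [hA]
    simp only [Prod.mk.injEq]
    constructor
    · simp only [valsOf, PySem.List.length_sorted]
    · exact (B_main (col lst)).symm
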